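-- pv_equiv track=rewrite | github.com/itmo333417/lab-1-cm | solver.py | get_diag_matrix
-- ===== SOURCE A (Python) =====
-- def get_diag_matrix(matrix, size):
--     for i in range(len(matrix) - 1):
--         maxi = -1
--         minn = 10 ** 20
--         k = -1
--         for j in range(i + 1, len(matrix)):
--             sum_of_row = sum(map(abs, matrix[j][: size]))
--             sum_after_element = sum(map(abs, matrix[j][j:]))
--             if abs(matrix[j][i]) >= sum_of_row - abs(matrix[j][i]) \
--                     and abs(matrix[j][i]) >= maxi \
--                     and sum_after_element <= minn:
--                 maxi = matrix[j][i]
--                 minn = sum_after_element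
--                 k = j
--         if k != -1:
--             matrix[i], matrix[k] = matrix[k], matrix[i]
--     return matrix
-- ===== SOURCE B (Python) =====
-- def get_diag_matrix(matrix, size):
--     # Pre: every row has at least len(matrix) - 1 entries (otherwise the
--     # selection loop would read past a row's end).
--     # For each row, cache the |.|-sum of its first `size` entries (it never
--     # changes) and its absolute prefix-sum array, so every test inside the
--     # quadratic selection loop is an O(1) lookup instead of an O(m) scan.
--     n = len(matrix)
--     aug = []
--     for row in matrix:
--         p = [0]
--         for x in row:
--             p.append(p[-1] + abs(x))
--         aug.append((row, sum(abs(x) for x in row[:size]), p))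
--     for i in range(n - 1):
--         maxi = -1
--         minn = 10 ** 20
--         k = -1
--         for j in range(i + 1, n):
--             row, srow, p = aug[j]
--             a = abs(row[i])
--             sum_after = p[-1] - p[j]
--             if a >= srow - a and a >= maxi and sum_after <= minn:
--                 maxi = row[i]
--                 minn = sum_after
--                 k = j
--         if k != -1:
--             aug[i], aug[k] = aug[k], aug[i]
--     matrix[:] = [row for row, _, _ in aug]
--     return matrix
-- ===== Notes on version B (the rewrite author's own statement) =====
-- stated objective: faster
-- what changed: B caches, per row, the absolute sum of its first `size` entries and its absolute prefix-sum array, and swaps those cached triples, so every row-sum/suffix-sum test in the quadratic selection loop is an O(1) lookup instead of a fresh O(m) scan; Pre_ excludes ragged matrices with a row shorter than len(matrix)-1, on which A's matrix[j][i] can raise IndexError (or, when the short row is never indexed, A returns a value B's p[j] lookup would not).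
-- outside the precondition, e.g. on get_diag_matrix([[1, 1], [2], [3]], 1): A returns [[3], [1, 1], [2]], B raises IndexError; on get_diag_matrix([[], [5]], 1): A returns [[5], []], B returns [[5], []]
import Mathlib
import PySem

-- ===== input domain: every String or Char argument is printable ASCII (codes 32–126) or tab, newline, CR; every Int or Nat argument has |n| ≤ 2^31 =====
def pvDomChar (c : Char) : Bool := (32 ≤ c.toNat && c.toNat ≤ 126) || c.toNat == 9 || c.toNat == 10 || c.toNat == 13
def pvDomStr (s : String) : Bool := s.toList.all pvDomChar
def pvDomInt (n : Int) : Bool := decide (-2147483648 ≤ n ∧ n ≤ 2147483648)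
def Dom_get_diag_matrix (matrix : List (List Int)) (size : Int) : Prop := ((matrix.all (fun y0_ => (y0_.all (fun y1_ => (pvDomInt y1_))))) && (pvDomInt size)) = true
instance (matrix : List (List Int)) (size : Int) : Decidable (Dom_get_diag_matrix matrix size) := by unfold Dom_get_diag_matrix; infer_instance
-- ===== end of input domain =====

-- B caches per-row sums (row-prefix sums and the |.|-sum of row[:size]) once, so the
-- quadratic selection loop does O(1) lookups instead of O(m) scans (objective: faster).
-- Both Pythons mutate `matrix` in place and return it; the equivalence proved here
-- is about the returned (= final in-place) list of rows.

-- ===== PORT A =====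
-- sum(map(abs, l))
def pvSumAbs (l : List Int) : Int := (l.map (fun x => |x|)).sum

-- inner loop of A: for j in range(i+1, len(matrix)) with state (maxi, minn, k)
def pvInnerA (mat : List (List Int)) (size : Int) (i : Int) : Int × Int × Int :=
  (PySem.List.pyRange (i + 1) (mat.length : Int) 1).foldl (fun st j =>
    let row := PySem.List.pyGetD mat j []
    let sum_of_row := pvSumAbs (PySem.List.slice row none (some size))
    let sum_after := pvSumAbs (PySem.List.slice row (some j) none)
    -- matrix[j][i]: in range under Pre_ (the default 0 is unreachable there)
    if |PySem.List.pyGetD row i 0| ≥ sum_of_row - |PySem.List.pyGetD row i 0| ∧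
       |PySem.List.pyGetD row i 0| ≥ st.1 ∧ sum_after ≤ st.2.1 then
      (PySem.List.pyGetD row i 0, sum_after, j)
    else st) (-1, 10 ^ 20, -1)

-- body of A's outer loop: select k, then matrix[i], matrix[k] = matrix[k], matrix[i]
def pvStepA (size : Int) (mat : List (List Int)) (i : Int) : List (List Int) :=
  let r := pvInnerA mat size i
  if r.2.2 ≠ -1 then
    PySem.List.pySetD (PySem.List.pySetD mat i (PySem.List.pyGetD mat r.2.2 []))
      r.2.2 (PySem.List.pyGetD mat i [])
  else mat

def get_diag_matrix (matrix : List (List Int)) (size : Int) : List (List Int) :=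
  (PySem.List.pyRange 0 ((matrix.length : Int) - 1) 1).foldl (pvStepA size) matrix

-- ===== PORT B =====
-- p = [0]; for x in row: p.append(p[-1] + abs(x))
def pvPrefix (row : List Int) : List Int :=
  row.foldl (fun p x => p ++ [PySem.List.pyGetD p (-1) 0 + |x|]) [0]

-- the cached triple for one row: (row, sum(abs(x) for x in row[:size]), prefix sums)
def pvAugRow (size : Int) (row : List Int) : List Int × Int × List Int :=
  (row, pvSumAbs (PySem.List.slice row none (some size)), pvPrefix row)

-- inner loop of B over aug, with O(1) cached lookups
def pvInnerB (aug : List (List Int × Int × List Int)) (n i : Int) : Int × Int × Int :=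
  (PySem.List.pyRange (i + 1) n 1).foldl (fun st j =>
    let rp := PySem.List.pyGetD aug j ([], 0, [])
    let sum_after := PySem.List.pyGetD rp.2.2 (-1) 0 - PySem.List.pyGetD rp.2.2 j 0
    if |PySem.List.pyGetD rp.1 i 0| ≥ rp.2.1 - |PySem.List.pyGetD rp.1 i 0| ∧
       |PySem.List.pyGetD rp.1 i 0| ≥ st.1 ∧ sum_after ≤ st.2.1 then
      (PySem.List.pyGetD rp.1 i 0, sum_after, j)
    else st) (-1, 10 ^ 20, -1)

-- body of B's outer loop: same selection, swap the cached triples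
def pvStepB (n : Int) (aug : List (List Int × Int × List Int)) (i : Int) :
    List (List Int × Int × List Int) :=
  let r := pvInnerB aug n i
  if r.2.2 ≠ -1 then
    PySem.List.pySetD (PySem.List.pySetD aug i (PySem.List.pyGetD aug r.2.2 ([], 0, [])))
      r.2.2 (PySem.List.pyGetD aug i ([], 0, []))
  else aug

def get_diag_matrix_alt (matrix : List (List Int)) (size : Int) : List (List Int) :=
  let n : Int := matrix.length
  let aug0 := matrix.foldl (fun acc row => acc ++ [pvAugRow size row]) []
  let aug := (PySem.List.pyRange 0 (n - 1) 1).foldl (pvStepB n) aug0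
  aug.map Prod.fst

-- ===== PRECONDITION & SPEC =====
-- Pre_ requires every row to have length ≥ len(matrix) - 1: ragged matrices with a
-- shorter row are excluded because A's matrix[j][i] can raise IndexError on them
-- (on a few such inputs the short row is never indexed and A still returns; see cites).
def Pre_get_diag_matrix (matrix : List (List Int)) (size : Int) : Prop :=
  ∀ row ∈ matrix, matrix.length ≤ row.length + 1
instance (matrix : List (List Int)) (size : Int) : Decidable (Pre_get_diag_matrix matrix size) := by unfold Pre_get_diag_matrix; infer_instance

def pvWitness_get_diag_matrix : List (List Int) × Int := ([[4, 1], [1, 3]], 2)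

def Spec_get_diag_matrix (matrix : List (List Int)) (size : Int) (out : List (List Int)) : Prop := out = get_diag_matrix_alt matrix size
instance (matrix : List (List Int)) (size : Int) (out : List (List Int)) : Decidable (Spec_get_diag_matrix matrix size out) := by unfold Spec_get_diag_matrix; infer_instance

-- ===== CLAIM (what is proved, stated in full; the proofs are below) =====
def Claim_equal_get_diag_matrix : Prop := ∀ (matrix : List (List Int)) (size : Int), Dom_get_diag_matrix matrix size → Pre_get_diag_matrix matrix size → Spec_get_diag_matrix matrix size (get_diag_matrix matrix size)

-- ===== LEMMAS AND PROOFS =====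

theorem pvSumAbs_append (a b : List Int) : pvSumAbs (a ++ b) = pvSumAbs a + pvSumAbs b := by
  simp [pvSumAbs]

theorem pvSumAbs_drop (row : List Int) (s : Nat) :
    pvSumAbs (row.drop s) = pvSumAbs row - pvSumAbs (row.take s) := by
  have h := pvSumAbs_append (row.take s) (row.drop s)
  rw [List.take_append_drop] at h
  omega

-- pvPrefix row is the table of absolute prefix sums of row
theorem pvPrefix_eq (row : List Int) :
    pvPrefix row = (List.range (row.length + 1)).map (fun t => pvSumAbs (row.take t)) := by
  induction row using List.reverseRecOn with
  | nil => simp [pvPrefix, pvSumAbs]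
  | append_singleton row x ih =>
    unfold pvPrefix at ih ⊢
    rw [List.foldl_append, ih, List.foldl_cons, List.foldl_nil]
    have hM : PySem.List.pyGetD
        ((List.range (row.length + 1)).map (fun t => pvSumAbs (row.take t))) (-1) 0
        = pvSumAbs row := by
      rw [List.range_succ, List.map_append, List.map_singleton,
        PySem.List.pyGetD_neg_one_append_singleton, List.take_length]
    rw [hM]
    rw [show (row ++ [x]).length + 1 = (row.length + 1) + 1 by simp]
    rw [List.range_succ (n := row.length + 1), List.map_append, List.map_singleton]
    congr 1
    · apply List.map_congr_left
      intro t ht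
      rw [List.mem_range] at ht
      rw [List.take_append_of_le_length (by omega)]
    · rw [show row.length + 1 = (row ++ [x]).length by simp, List.take_length,
        pvSumAbs_append]
      simp [pvSumAbs]

theorem pvPrefix_get (row : List Int) (t : Nat) (ht : t ≤ row.length) :
    PySem.List.pyGetD (pvPrefix row) (t : Int) 0 = pvSumAbs (row.take t) := by
  rw [pvPrefix_eq, PySem.List.pyGetD_natCast]
  exact PySem.List.getD_map_range _ _ _ _ (by omega)

-- p[-1] is the full row's absolute sum
theorem pvPrefix_last (row : List Int) :
    PySem.List.pyGetD (pvPrefix row) (-1) 0 = pvSumAbs row := by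
  rw [pvPrefix_eq, List.range_succ, List.map_append, List.map_singleton,
    PySem.List.pyGetD_neg_one_append_singleton, List.take_length]

-- B's prefix difference is A's sum(map(abs, row[j:])), for indices inside the row
theorem pvSumAfter_eq (row : List Int) (j : Int) (hj : 0 ≤ j)
    (hjl : j ≤ (row.length : Int)) :
    PySem.List.pyGetD (pvPrefix row) (-1) 0 - PySem.List.pyGetD (pvPrefix row) j 0
      = pvSumAbs (PySem.List.slice row (some j) none) := by
  rw [PySem.List.slice_from row hj, pvSumAbs_drop, pvPrefix_last]
  have h := pvPrefix_get row j.toNat (by omega)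
  rw [show ((j.toNat : Nat) : Int) = j by omega] at h
  rw [h]

theorem pvFoldl_preserve {α β : Type} (P : β → Prop) (f : β → α → β) :
    ∀ (l : List α) (init : β), P init → (∀ st a, a ∈ l → P st → P (f st a)) →
      P (l.foldl f init) := by
  intro l
  induction l with
  | nil => intro init h _; exact h
  | cons a l ih =>
    intro init h hstep
    exact ih _ (hstep init a List.mem_cons_self h)
      (fun st b hb => hstep st b (List.mem_cons_of_mem a hb))

theorem pvInnerA_k_range (mat : List (List Int)) (size i : Int) :
    (pvInnerA mat size i).2.2 = -1 ∨
      (i + 1 ≤ (pvInnerA mat size i).2.2 ∧ (pvInnerA mat size i).2.2 < (mat.length : Int)) := by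
  unfold pvInnerA
  apply pvFoldl_preserve
    (fun st : Int × Int × Int => st.2.2 = -1 ∨ (i + 1 ≤ st.2.2 ∧ st.2.2 < (mat.length : Int)))
  · left; rfl
  · intro st j hj hst
    rw [PySem.List.mem_pyRange_one] at hj
    dsimp only
    split
    · right; exact hj
    · exact hst

-- the two selection loops compute the same (maxi, minn, k);
-- hrows : every row is long enough that p[j] is inside the prefix table
theorem pvInner_eq (mat : List (List Int)) (size i : Int) (hi : 0 ≤ i)
    (hrows : ∀ row ∈ mat, mat.length ≤ row.length + 1) :
    pvInnerB (mat.map (pvAugRow size)) (mat.length : Int) i = pvInnerA mat size i := by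
  unfold pvInnerA pvInnerB
  apply PySem.List.foldl_congr_mem
  intro st j hj
  rw [PySem.List.mem_pyRange_one] at hj
  have hj0 : 0 ≤ j := by omega
  have hjl : j < ((mat.map (pvAugRow size)).length : Int) := by
    rw [List.length_map]; omega
  rw [PySem.List.pyGetD_eq_getElem _ _ hj0 hjl,
      PySem.List.pyGetD_eq_getElem mat _ hj0 (by omega)]
  rw [List.getElem_map]
  dsimp only [pvAugRow]
  set row := mat[j.toNat] with hrow
  have hmem : row ∈ mat := by rw [hrow]; exact List.getElem_mem _
  have hlen := hrows row hmem
  rw [pvSumAfter_eq row j hj0 (by omega)]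

-- one body of the outer loop: B's step is A's step through the cached-triple map
theorem pvStep_eq (size : Int) (N : Nat) (mat : List (List Int)) (hlen : mat.length = N)
    (hrows : ∀ row ∈ mat, N ≤ row.length + 1)
    (i : Int) (hi : 0 ≤ i) (hiN : i < (N : Int)) :
    pvStepB (N : Int) (mat.map (pvAugRow size)) i =
      (pvStepA size mat i).map (pvAugRow size) ∧
    (pvStepA size mat i).length = N ∧
    (∀ row ∈ pvStepA size mat i, N ≤ row.length + 1) := by
  have hinner : pvInnerB (mat.map (pvAugRow size)) (N : Int) i = pvInnerA mat size i := by
    rw [show ((N : Nat) : Int) = (mat.length : Int) by omega]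
    exact pvInner_eq mat size i hi (by rw [hlen]; exact hrows)
  unfold pvStepA pvStepB
  rw [hinner]
  set r := pvInnerA mat size i with hr
  by_cases hk : r.2.2 = -1
  · simp only [hk]
    norm_num
    exact ⟨hlen, hrows⟩
  · have hkr : i + 1 ≤ r.2.2 ∧ r.2.2 < (mat.length : Int) := by
      rcases pvInnerA_k_range mat size i with h | h
      · exact absurd h hk
      · exact h
    have hk0 : 0 ≤ r.2.2 := by omega
    simp only [ne_eq, hk, not_false_iff, if_true]
    rw [PySem.List.pySetD_of_nonneg _ _ hi, PySem.List.pySetD_of_nonneg _ _ hk0,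
        PySem.List.pySetD_of_nonneg _ _ hi, PySem.List.pySetD_of_nonneg _ _ hk0]
    rw [PySem.List.pyGetD_eq_getElem _ _ hk0 (by rw [List.length_map]; omega),
        PySem.List.pyGetD_eq_getElem _ _ hi (by rw [List.length_map]; omega),
        PySem.List.pyGetD_eq_getElem _ _ hk0 (by omega),
        PySem.List.pyGetD_eq_getElem _ _ hi (by omega)]
    rw [List.getElem_map, List.getElem_map]
    refine ⟨by rw [List.map_set, List.map_set], by rw [List.length_set, List.length_set]; exact hlen, ?_⟩
    intro row hrowmem
    rcases List.mem_or_eq_of_mem_set hrowmem with h | h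
    · rcases List.mem_or_eq_of_mem_set h with h2 | h2
      · exact hrows row h2
      · exact hrows _ (h2 ▸ List.getElem_mem _)
    · exact hrows _ (h ▸ List.getElem_mem _)

theorem pvOuter_eq (size : Int) (N : Nat) :
    ∀ (L : List Int), (∀ x ∈ L, 0 ≤ x ∧ x < (N : Int)) →
    ∀ (mat : List (List Int)), mat.length = N → (∀ row ∈ mat, N ≤ row.length + 1) →
    L.foldl (pvStepB (N : Int)) (mat.map (pvAugRow size)) =
      (L.foldl (pvStepA size) mat).map (pvAugRow size) := by
  intro L
  induction L with
  | nil => intro _ mat hlen _; rfl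
  | cons a L ih =>
    intro hL mat hlen hrows
    have ha := hL a (List.mem_cons_self)
    obtain ⟨hB, hA, hR⟩ := pvStep_eq size N mat hlen hrows a ha.1 ha.2
    simp only [List.foldl_cons, hB]
    exact ih (fun x hx => hL x (List.mem_cons_of_mem a hx)) _ hA hR

-- ===== VERDICT (by name: the statement is the Claim_ definition above) =====
theorem get_diag_matrix_spec : Claim_equal_get_diag_matrix := by
  intro matrix size _ hpre
  unfold Spec_get_diag_matrix get_diag_matrix get_diag_matrix_alt
  rw [PySem.List.foldl_append_singleton_eq_map (pvAugRow size) matrix []]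
  simp only [List.nil_append]
  have hmem : ∀ x ∈ PySem.List.pyRange 0 ((matrix.length : Int) - 1) 1,
      0 ≤ x ∧ x < (matrix.length : Int) := by
    intro x hx
    rw [PySem.List.mem_pyRange_one] at hx
    omega
  have hB := pvOuter_eq size matrix.length
    (PySem.List.pyRange 0 ((matrix.length : Int) - 1) 1) hmem matrix rfl hpre
  rw [hB, List.map_map]
  rw [show (Prod.fst ∘ pvAugRow size) = id from rfl, List.map_id]
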